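-- pv_equiv track=rewrite | github.com/maxscheurer/taco | taco/translate/order.py | get_sort_list
-- ===== SOURCE A (Python) =====
-- def get_sort_list(natoms, orders):
--     """Get the molecule sord list for transforming matrices
--
--     Parameters:
--     -----------
--     natoms : int
--         Number of atoms in the molecule.
--     orders : list[list[ N atoms (int)]]
--         Order of basis functions compared to reference program,
--         one list per atom.
--
--     Returns:
--     --------
--     List with the whole molecule order indices.
--
--     """
--     sort = []
--     offset = 0
--     for iatom in range(natoms):
--         for n in orders[iatom]:
--             sort.append(n + offset)
--         offset += len(orders[iatom])
--     return sort
-- ===== SOURCE B (Python) =====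
-- def get_sort_list(natoms, orders):
--     """Divide-and-conquer: solve each half of the atom range independently,
--     then concatenate, shifting the right half by the left half's total length."""
--     def solve(lo, hi):
--         # returns (indices for atoms lo..hi-1 with offsets relative to lo, total length)
--         if lo >= hi:
--             return [], 0
--         if hi - lo == 1:
--             row = orders[lo]
--             return list(row), len(row)
--         mid = (lo + hi) // 2
--         left, llen = solve(lo, mid)
--         right, rlen = solve(mid, hi)
--         return left + [m + llen for m in right], llen + rlen
--     return solve(0, natoms)[0]
-- ===== Notes on version B (the rewrite author's own statement) =====
-- stated objective: alternative
-- what changed: B solves the problem by divide-and-conquer on the atom range: each half is solved independently with offsets relative to its own start, and the right half's result is shifted by the left half's total length on concatenation, eliminating A's threaded running-offset accumulator.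
import Mathlib
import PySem

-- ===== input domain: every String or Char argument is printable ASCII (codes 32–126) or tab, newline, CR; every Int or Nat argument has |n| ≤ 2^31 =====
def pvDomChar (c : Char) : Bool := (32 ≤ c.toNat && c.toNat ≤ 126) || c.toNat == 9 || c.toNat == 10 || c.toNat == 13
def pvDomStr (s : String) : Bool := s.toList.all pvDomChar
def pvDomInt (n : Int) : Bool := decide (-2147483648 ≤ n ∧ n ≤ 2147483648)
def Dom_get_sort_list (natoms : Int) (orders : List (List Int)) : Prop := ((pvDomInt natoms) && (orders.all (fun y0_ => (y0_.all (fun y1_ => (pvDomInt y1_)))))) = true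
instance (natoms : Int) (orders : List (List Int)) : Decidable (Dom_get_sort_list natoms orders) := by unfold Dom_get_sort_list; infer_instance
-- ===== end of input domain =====

-- B replaces A's running-offset single pass by divide-and-conquer on the atom range: halves are solved independently and the right half is shifted by the left half's total length (alternative algorithm; similar cost).


-- ===== PORT A =====
-- single pass over range(natoms), threading (sort, offset); orders[iatom] is pyGet? (Pre_ excludes the out-of-range case)
def get_sort_list (natoms : Int) (orders : List (List Int)) : List Int :=
  ((PySem.List.pyRange 0 natoms 1).foldl
    (fun (st : List Int × Int) iatom =>
      let row := (PySem.List.pyGet? orders iatom).getD []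
      (st.1 ++ row.map (fun n => n + st.2), st.2 + (row.length : Int)))
    ([], 0)).1

-- ===== PORT B =====
-- recursive divide-and-conquer helper solve(lo, hi) of Source B: returns (indices relative to lo, total length)
def pvSolve (orders : List (List Int)) (lo hi : Int) : List Int × Int :=
  if _h1 : hi ≤ lo then ([], 0)
  else if _h2 : hi - lo = 1 then
    let row := (PySem.List.pyGet? orders lo).getD []
    (row, (row.length : Int))
  else
    let mid := PySem.Int.floordiv (lo + hi) 2
    let L := pvSolve orders lo mid
    let R := pvSolve orders mid hi
    (L.1 ++ R.1.map (fun m => m + L.2), L.2 + R.2)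
termination_by (hi - lo).toNat
decreasing_by
  · have hm := PySem.Int.floordiv_two_mid_bounds (lo := lo) (hi := hi) (by omega)
    have he : PySem.Int.floordiv (lo + hi) 2 = (lo + hi) / 2 :=
      PySem.Int.floordiv_eq_ediv_of_pos (by omega)
    rw [he] at hm ⊢; omega
  · have hm := PySem.Int.floordiv_two_mid_bounds (lo := lo) (hi := hi) (by omega)
    have he : PySem.Int.floordiv (lo + hi) 2 = (lo + hi) / 2 :=
      PySem.Int.floordiv_eq_ediv_of_pos (by omega)
    rw [he] at hm ⊢; omega

def get_sort_list_alt (natoms : Int) (orders : List (List Int)) : List Int :=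
  (pvSolve orders 0 natoms).1

-- ===== PRECONDITION & SPEC =====
-- Pre_ excludes exactly the inputs where orders[iatom] raises IndexError in Python (positive natoms exceeding len(orders)); both A and B raise there
def Pre_get_sort_list (natoms : Int) (orders : List (List Int)) : Prop :=
  natoms ≤ 0 ∨ natoms ≤ (orders.length : Int)
instance (natoms : Int) (orders : List (List Int)) : Decidable (Pre_get_sort_list natoms orders) := by unfold Pre_get_sort_list; infer_instance
def pvWitness_get_sort_list : Int × List (List Int) := (2, [[1, 0], [0]])

def Spec_get_sort_list (natoms : Int) (orders : List (List Int)) (out : List Int) : Prop := out = get_sort_list_alt natoms orders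
instance (natoms : Int) (orders : List (List Int)) (out : List Int) : Decidable (Spec_get_sort_list natoms orders out) := by unfold Spec_get_sort_list; infer_instance

-- ===== CLAIM =====
def Claim_equal_get_sort_list : Prop := ∀ (natoms : Int) (orders : List (List Int)), Dom_get_sort_list natoms orders → Pre_get_sort_list natoms orders → Spec_get_sort_list natoms orders (get_sort_list natoms orders)

-- ===== LEMMAS AND PROOFS =====

-- the row of atom i
def pvRow (orders : List (List Int)) (i : Int) : List Int :=
  (PySem.List.pyGet? orders i).getD []

-- rows of atoms lo..hi-1
def pvRows (orders : List (List Int)) (lo hi : Int) : List (List Int) :=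
  (PySem.List.pyRange lo hi 1).map (pvRow orders)

-- common specification: flatten rows, each shifted by the running offset
def pvSpecFlat : List (List Int) → Int → List Int
  | [], _ => []
  | r :: rs, off => r.map (fun n => n + off) ++ pvSpecFlat rs (off + (r.length : Int))

def pvTotLen (rs : List (List Int)) : Int := (rs.map (fun r => (r.length : Int))).sum

theorem pvA_inv (rows : List (List Int)) (acc : List Int) (off : Int) :
    (rows.foldl (fun (st : List Int × Int) row =>
        (st.1 ++ row.map (fun n => n + st.2), st.2 + (row.length : Int))) (acc, off)).1
      = acc ++ pvSpecFlat rows off := by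
  induction rows generalizing acc off with
  | nil => simp [pvSpecFlat]
  | cons r rs ih => simp [pvSpecFlat, ih]

theorem pvSpecFlat_shift (rows : List (List Int)) (c d : Int) :
    pvSpecFlat rows (c + d) = (pvSpecFlat rows d).map (fun m => m + c) := by
  induction rows generalizing d with
  | nil => simp [pvSpecFlat]
  | cons r rs ih =>
      simp only [pvSpecFlat, List.map_append, List.map_map]
      rw [show c + d + (r.length : Int) = c + (d + (r.length : Int)) by ring, ih]
      congr 1
      exact List.map_congr_left (fun a _ => by simp [Function.comp]; ring)

theorem pvSpecFlat_append (xs ys : List (List Int)) (off : Int) :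
    pvSpecFlat (xs ++ ys) off = pvSpecFlat xs off ++ pvSpecFlat ys (off + pvTotLen xs) := by
  induction xs generalizing off with
  | nil => simp [pvSpecFlat, pvTotLen]
  | cons r rs ih =>
      simp only [List.cons_append, pvSpecFlat, ih, pvTotLen, List.map_cons, List.sum_cons,
        List.append_assoc]
      congr 3
      ring

theorem pvSolve_eq (orders : List (List Int)) (lo hi : Int) :
    pvSolve orders lo hi
      = (pvSpecFlat (pvRows orders lo hi) 0, pvTotLen (pvRows orders lo hi)) := by
  induction lo, hi using pvSolve.induct orders with
  | case1 lo hi h1 =>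
      rw [pvSolve]
      simp [h1, pvRows, PySem.List.pyRange_one_eq_nil h1, pvSpecFlat, pvTotLen]
  | case2 lo hi h1 h2 =>
      rw [pvSolve]
      simp only [dif_neg h1, dif_pos h2]
      have : hi = lo + 1 := by omega
      subst this
      simp [pvRows, PySem.List.pyRange_one_singleton, pvSpecFlat, pvTotLen, pvRow]
  | case3 lo hi h1 h2 mid ihL ihR =>
      have hm : lo ≤ mid ∧ mid ≤ hi :=
        PySem.Int.floordiv_two_mid_bounds (lo := lo) (hi := hi) (by omega)
      have e1 : pvSolve orders lo hi
          = ((pvSolve orders lo mid).1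
              ++ (pvSolve orders mid hi).1.map (fun m => m + (pvSolve orders lo mid).2),
             (pvSolve orders lo mid).2 + (pvSolve orders mid hi).2) := by
        rw [pvSolve]; simp only [dif_neg h1, dif_neg h2]; rfl
      rw [e1]
      have hsplit : pvRows orders lo hi = pvRows orders lo mid ++ pvRows orders mid hi := by
        unfold pvRows
        rw [PySem.List.pyRange_one_append lo mid hi hm.1 hm.2, List.map_append]
      rw [ihL, ihR, hsplit, pvSpecFlat_append]
      simp only []
      have hshift : pvSpecFlat (pvRows orders mid hi) (0 + pvTotLen (pvRows orders lo mid))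
          = (pvSpecFlat (pvRows orders mid hi) 0).map
              (fun m => m + pvTotLen (pvRows orders lo mid)) := by
        rw [show (0 : Int) + pvTotLen (pvRows orders lo mid)
              = pvTotLen (pvRows orders lo mid) + 0 by ring]
        exact pvSpecFlat_shift _ _ _
      rw [hshift]
      simp [pvTotLen]

-- ===== VERDICT =====
theorem get_sort_list_spec : Claim_equal_get_sort_list := by
  intro natoms orders _ _
  unfold Spec_get_sort_list get_sort_list get_sort_list_alt
  have hA : ((PySem.List.pyRange 0 natoms 1).foldl
      (fun (st : List Int × Int) iatom =>
        let row := (PySem.List.pyGet? orders iatom).getD []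
        (st.1 ++ row.map (fun n => n + st.2), st.2 + (row.length : Int)))
      ([], 0)).1
      = ((pvRows orders 0 natoms).foldl (fun (st : List Int × Int) row =>
          (st.1 ++ row.map (fun n => n + st.2), st.2 + (row.length : Int))) ([], 0)).1 := by
    unfold pvRows pvRow
    rw [List.foldl_map]
  rw [hA, pvA_inv, pvSolve_eq]
  simp
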